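-- pv_equiv track=rewrite | github.com/bijalm/codesignal-arcade | intro /reverseInParantheses.py | solution
-- ===== SOURCE A (Python) =====
-- def solution(inputString):
--     reverse = []
--
--     for i in inputString:
--         if i == ')':
--             rev = ''
--             while reverse and reverse[-1] != '(':
--                 rev += reverse.pop()
--             reverse.pop()
--             for r in rev:
--                 reverse.append(r)
--         else:
--             reverse.append(i)
--
--     return ''.join(reverse)
-- ===== SOURCE B (Python) =====
-- def solution(inputString):
--     stack = []
--     cur = []
--     for c in inputString:
--         if c == '(':
--             stack.append(cur)
--             cur = []
--         elif c == ')':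
--             cur.reverse()
--             prev = stack.pop()
--             prev.extend(cur)
--             cur = prev
--         else:
--             cur.append(c)
--     stack.append(cur)
--     return '('.join(''.join(level) for level in stack)
-- ===== Notes on version B (the rewrite author's own statement) =====
-- stated objective: alternative
-- what changed: A keeps one flat list with '(' sentinels and, at every ')', pops characters one by one into a growing string and re-pushes them; B keeps a per-level buffer plus a stack of suspended outer buffers, reverses the finished level in place and merges it in bulk, then joins any levels left open with '('.
import Mathlib
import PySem

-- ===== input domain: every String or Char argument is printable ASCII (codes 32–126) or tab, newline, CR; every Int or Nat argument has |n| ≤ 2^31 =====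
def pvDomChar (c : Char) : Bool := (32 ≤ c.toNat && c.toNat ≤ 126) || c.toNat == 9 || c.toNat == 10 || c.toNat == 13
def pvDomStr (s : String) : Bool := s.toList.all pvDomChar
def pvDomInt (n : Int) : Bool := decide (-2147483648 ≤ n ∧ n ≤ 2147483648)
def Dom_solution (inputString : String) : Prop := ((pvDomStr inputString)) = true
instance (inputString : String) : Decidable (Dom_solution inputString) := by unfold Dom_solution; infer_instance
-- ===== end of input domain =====

-- B replaces A's flat list with '(' sentinels and char-by-char pop/re-push at each ')'
-- by a per-level buffer plus a stack of suspended outer buffers, merged in bulk (alternative algorithm, same cost).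


-- ===== PORT A =====
-- A's stack 'reverse' is a Python list with append/pop at the end; here it is a
-- List Char with the TOP at the HEAD (Python index -1 = head), so append = cons.
-- Inner while loop: pop while nonempty and top ≠ '(' , accumulating into rev (in pop order).
def popRevA (st : List Char) (rev : List Char) : List Char × List Char :=
  match st with
  | [] => (rev, [])
  | x :: xs => if x ≠ '(' then popRevA xs (rev ++ [x]) else (rev, x :: xs)

def loopA (t : List Char) (st : List Char) : List Char :=
  match t with
  | [] => st
  | c :: cs =>
    if c = ')' then
      let (rev, st') := popRevA st []
      let st'' := st'.tail          -- reverse.pop(); Python raises IndexError if empty (excluded by Pre_)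
      loopA cs (rev.foldl (fun s r => r :: s) st'')   -- for r in rev: reverse.append(r)
    else
      loopA cs (c :: st)

def solution (inputString : String) : String :=
  String.ofList ((loopA inputString.toList []).reverse)   -- ''.join(reverse); head-is-top, so reverse

-- ===== PORT B =====
-- cur = current level's buffer (Python order); stk = suspended outer buffers,
-- most recently suspended at the HEAD (Python stack[-1] = head).
def loopB (t : List Char) (cur : List Char) (stk : List (List Char)) :
    List Char × List (List Char) :=
  match t with
  | [] => (cur, stk)
  | c :: cs =>
    if c = '(' then loopB cs [] (cur :: stk)
    else if c = ')' then
      match stk with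
      | prev :: rest => loopB cs (prev ++ cur.reverse) rest  -- cur.reverse(); prev.extend(cur)
      | [] => loopB cs cur []   -- Python: stack.pop() raises IndexError (excluded by Pre_)
    else loopB cs (cur ++ [c]) stk

-- '('.join(''.join(level) for level in stack)
def pyJoinParen (ls : List (List Char)) : List Char :=
  match ls with
  | [] => []
  | [l] => l
  | l :: ls => l ++ '(' :: pyJoinParen ls

def solution_alt (inputString : String) : String :=
  let (cur, stk) := loopB inputString.toList [] []
  String.ofList (pyJoinParen (stk.reverse ++ [cur]))   -- stack.append(cur); Python order = stk reversed

-- ===== PRECONDITION & SPEC =====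
-- Pre_ excludes exactly the inputs with a ')' that has no matching '(' before it:
-- there A raises IndexError (pop from an empty list), and so does B (stack.pop()).
def Pre_solution (inputString : String) : Prop :=
  ∀ i, i ≤ inputString.toList.length →
      (inputString.toList.take i).count ')' ≤ (inputString.toList.take i).count '('
instance (inputString : String) : Decidable (Pre_solution inputString) := by
  unfold Pre_solution; infer_instance

def pvWitness_solution : String := "(abc)d"

def Spec_solution (inputString : String) (out : String) : Prop := out = solution_alt inputString
instance (inputString : String) (out : String) : Decidable (Spec_solution inputString out) := by unfold Spec_solution; infer_instance

-- ===== CLAIM (what is proved, stated in full; the proofs are below) =====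
def Claim_equal_solution : Prop := ∀ (inputString : String), Dom_solution inputString → Pre_solution inputString → Spec_solution inputString (solution inputString)

-- ===== LEMMAS AND PROOFS =====

-- glue: A's flat stack (head = top) as a function of B's buffers (cur :: stk)
def glue (st : List (List Char)) : List Char :=
  match st with
  | [] => []
  | [l] => l.reverse
  | l :: ls => l.reverse ++ '(' :: glue ls

lemma popRevA_spec (u : List Char) : ∀ acc v, '(' ∉ u →
    popRevA (u ++ '(' :: v) acc = (acc ++ u, '(' :: v) := by
  induction u with
  | nil => intro acc v _; simp [popRevA]
  | cons x xs ih =>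
    intro acc v h
    have hx : x ≠ '(' := by intro e; exact h (e ▸ List.mem_cons_self)
    have hxs : '(' ∉ xs := fun m => h (List.mem_cons_of_mem _ m)
    simp [popRevA, hx, ih (acc ++ [x]) v hxs]

lemma foldl_cons_rev (l : List Char) : ∀ st, l.foldl (fun s r => r :: s) st = l.reverse ++ st := by
  induction l with
  | nil => intro st; simp
  | cons x xs ih => intro st; simp [List.foldl, ih]

lemma glue_cons (l : List Char) (ls : List (List Char)) (h : ls ≠ []) :
    glue (l :: ls) = l.reverse ++ '(' :: glue ls := by
  cases ls with
  | nil => exact absurd rfl h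
  | cons a as => rfl

lemma pyJoinParen_snoc (xs : List (List Char)) (y : List Char) (h : xs ≠ []) :
    pyJoinParen (xs ++ [y]) = pyJoinParen xs ++ '(' :: y := by
  induction xs with
  | nil => exact absurd rfl h
  | cons x xs ih =>
    cases xs with
    | nil => simp [pyJoinParen]
    | cons a as =>
      have := ih (by simp)
      simp only [List.cons_append, pyJoinParen] at this ⊢
      rw [this]
      simp

lemma glue_reverse (st : List (List Char)) (h : st ≠ []) :
    (glue st).reverse = pyJoinParen st.reverse := by
  induction st with
  | nil => exact absurd rfl h
  | cons l ls ih =>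
    cases ls with
    | nil => simp [glue, pyJoinParen]
    | cons a as =>
      rw [glue_cons _ _ (by simp)]
      have h1 : (glue (a :: as)).reverse = pyJoinParen (a :: as).reverse := ih (by simp)
      have h2 : (a :: as).reverse ≠ [] := by simp
      simp only [List.reverse_append, List.reverse_cons]
      rw [show as.reverse ++ [a] ++ [l] = (a :: as).reverse ++ [l] by simp,
          pyJoinParen_snoc _ _ h2, ← h1]
      simp

lemma sim (t : List Char) : ∀ (cur : List Char) (stk : List (List Char)),
    '(' ∉ cur → (∀ l ∈ stk, '(' ∉ l) →
    (∀ i, (t.take i).count ')' < stk.length + 1 + (t.take i).count '(') →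
    loopA t (glue (cur :: stk)) = glue ((loopB t cur stk).1 :: (loopB t cur stk).2) := by
  induction t with
  | nil => intro cur stk _ _ _; rfl
  | cons c cs ih =>
    intro cur stk hcur hstk hbal
    by_cases hop : c = '('
    · subst hop
      have hstepB : loopB ('(' :: cs) cur stk = loopB cs [] (cur :: stk) := by simp [loopB]
      have hstepA : loopA ('(' :: cs) (glue (cur :: stk)) = loopA cs ('(' :: glue (cur :: stk)) := by
        simp [loopA]
      have hglue2 : glue ([] :: cur :: stk) = '(' :: glue (cur :: stk) := by
        rw [glue_cons _ _ (by simp)]; simp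
      have hstk' : ∀ l ∈ cur :: stk, '(' ∉ l := by
        intro l hl
        rw [List.mem_cons] at hl
        rcases hl with rfl | hl
        · exact hcur
        · exact hstk _ hl
      have hbal' : ∀ i, (cs.take i).count ')' < (cur :: stk).length + 1 + (cs.take i).count '(' := by
        intro i
        have := hbal (i + 1)
        simp [List.take_succ_cons, List.count_cons] at this ⊢
        omega
      rw [hstepA, hstepB, ← hglue2]
      exact ih [] (cur :: stk) (by simp) hstk' hbal'
    · by_cases hcl : c = ')'
      · subst hcl
        have hlen : 1 ≤ stk.length := by
          have := hbal 1
          simp [List.count_cons] at this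
          omega
        match stk, hstk, hbal, hlen with
        | prev :: rest, hstk, hbal, _ =>
          have hcurr : '(' ∉ cur.reverse := by simpa using hcur
          have hglue : glue (cur :: prev :: rest) = cur.reverse ++ '(' :: glue (prev :: rest) :=
            glue_cons _ _ (by simp)
          have hstepA : loopA (')' :: cs) (glue (cur :: prev :: rest))
              = loopA cs (cur ++ glue (prev :: rest)) := by
            simp only [loopA, hglue]
            rw [popRevA_spec _ [] _ hcurr]
            simp [foldl_cons_rev]
          have hstepB : loopB (')' :: cs) cur (prev :: rest)
              = loopB cs (prev ++ cur.reverse) rest := by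
            simp [loopB]
          have hglue2 : glue ((prev ++ cur.reverse) :: rest) = cur ++ glue (prev :: rest) := by
            cases rest with
            | nil => simp [glue]
            | cons x xs =>
              rw [glue_cons (prev ++ cur.reverse) (x :: xs) (by simp),
                  glue_cons prev (x :: xs) (by simp)]
              simp
          have hcur' : '(' ∉ prev ++ cur.reverse := by
            have hp : '(' ∉ prev := hstk _ List.mem_cons_self
            simp [hp, hcur]
          have hstk' : ∀ l ∈ rest, '(' ∉ l := fun l hl => hstk _ (by simp [hl])
          have hbal' : ∀ i, (cs.take i).count ')' < rest.length + 1 + (cs.take i).count '(' := by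
            intro i
            have := hbal (i + 1)
            simp [List.take_succ_cons, List.count_cons] at this ⊢
            omega
          rw [hstepA, hstepB, ← hglue2]
          exact ih _ _ hcur' hstk' hbal'
      · have hstepA : loopA (c :: cs) (glue (cur :: stk)) = loopA cs (c :: glue (cur :: stk)) := by
          simp [loopA, hcl]
        have hstepB : loopB (c :: cs) cur stk = loopB cs (cur ++ [c]) stk := by
          simp [loopB, hop, hcl]
        have hglue2 : glue ((cur ++ [c]) :: stk) = c :: glue (cur :: stk) := by
          cases stk with
          | nil => simp [glue]
          | cons x xs =>
            rw [glue_cons (cur ++ [c]) (x :: xs) (by simp),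
                glue_cons cur (x :: xs) (by simp)]
            simp
        have hcur' : '(' ∉ cur ++ [c] := by simp [hcur, Ne.symm hop]
        have hbal' : ∀ i, (cs.take i).count ')' < stk.length + 1 + (cs.take i).count '(' := by
          intro i
          have := hbal (i + 1)
          simp [List.take_succ_cons, List.count_cons, hop, hcl] at this ⊢
          omega
        rw [hstepA, hstepB, ← hglue2]
        exact ih _ _ hcur' hstk hbal'

-- ===== VERDICT (by name: the statement is the Claim_ definition above) =====
theorem solution_spec : Claim_equal_solution := by
  intro s _ hpre
  have hbal : ∀ i, (s.toList.take i).count ')' < ([] : List (List Char)).length + 1 + (s.toList.take i).count '(' := by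
    intro i
    by_cases hi : i ≤ s.toList.length
    · have := hpre i hi
      simp; omega
    · have heq : s.toList.take i = s.toList := List.take_of_length_le (by omega)
      have h0 := hpre s.toList.length le_rfl
      rw [List.take_length] at h0
      rw [heq]
      simp
      omega
  have e1 := sim s.toList [] [] (by simp) (by simp) hbal
  show solution s = solution_alt s
  unfold solution solution_alt
  have e1' : loopA s.toList ([] : List Char)
      = glue ((loopB s.toList [] []).1 :: (loopB s.toList [] []).2) := e1
  rw [e1', glue_reverse _ (by simp)]
  simp
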